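-- pv_equiv track=rewrite | github.com/ebonian/compprog | examples/grader/9/Fill_In_Numbers.py | pattern3
-- ===== SOURCE A (Python) =====
-- def pattern3(N):
--     c=1
--     ans=[]
--     for i in range(N):
--         temp=[]
--         for j in range(N):
--             if j<i: temp.append(0)
--             else:
--                 temp.append(c)
--                 c+=1
--         ans.append(temp)
--     return ans
-- ===== SOURCE B (Python) =====
-- def pattern3(N):
--     ans = []
--     for i in range(N):
--         start = 1 + i * N - i * (i - 1) // 2
--         ans.append([0] * i + list(range(start, start + (N - i))))
--     return ans
-- ===== Notes on version B (the rewrite author's own statement) =====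
-- stated objective: simpler
-- what changed: Replaces the counter threaded across all N*N cells and the per-cell j<i branch by a closed-form per-row first value (one plus i*N minus i*(i-1)//2), building each row as i zeros followed by a range of consecutive numbers.
import Mathlib
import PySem

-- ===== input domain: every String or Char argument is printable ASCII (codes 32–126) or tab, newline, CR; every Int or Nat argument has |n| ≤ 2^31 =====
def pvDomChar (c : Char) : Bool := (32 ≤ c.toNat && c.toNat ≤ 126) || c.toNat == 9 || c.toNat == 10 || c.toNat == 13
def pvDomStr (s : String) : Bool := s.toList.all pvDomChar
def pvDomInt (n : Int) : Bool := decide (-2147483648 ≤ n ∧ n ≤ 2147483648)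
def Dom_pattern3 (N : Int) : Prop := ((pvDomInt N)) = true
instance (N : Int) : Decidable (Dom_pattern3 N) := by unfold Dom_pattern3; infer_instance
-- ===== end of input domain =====

-- B replaces A's counter threaded across all cells (and the per-cell j<i branch) by a
-- closed-form first value per row; objective: simpler decomposition, same cost.

-- ===== PORT A =====
-- range(N) is empty for N ≤ 0, matching List.range N.toNat; loop indices i, j are the
-- nonnegative range values, so the Python comparison j < i is the Nat comparison here.
def pattern3 (N : Int) : List (List Int) :=
  ((List.range N.toNat).foldl (fun (st : Int × List (List Int)) (i : ℕ) =>
      let inner := (List.range N.toNat).foldl (fun (s : Int × List Int) (j : ℕ) =>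
          if j < i then (s.1, s.2 ++ [(0 : Int)])
          else (s.1 + 1, s.2 ++ [s.1])) (st.1, ([] : List Int))
      (inner.1, st.2 ++ [inner.2])) (1, [])).2

-- ===== PORT B =====
def pattern3_alt (N : Int) : List (List Int) :=
  (List.range N.toNat).map (fun (i : ℕ) =>
    let start : Int := 1 + (i : Int) * N - PySem.Int.floordiv ((i : Int) * ((i : Int) - 1)) 2
    List.replicate i (0 : Int) ++ (List.range (N.toNat - i)).map (fun (k : ℕ) => start + (k : Int)))

-- ===== PRECONDITION & SPEC =====
def Spec_pattern3 (N : Int) (out : List (List Int)) : Prop := out = pattern3_alt N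
instance (N : Int) (out : List (List Int)) : Decidable (Spec_pattern3 N out) := by unfold Spec_pattern3; infer_instance

-- ===== CLAIM (what is proved, stated in full; the proofs are below) =====
def Claim_equal_pattern3 : Prop := ∀ (N : Int), Dom_pattern3 N → Spec_pattern3 N (pattern3 N)

-- ===== LEMMAS AND PROOFS =====

-- counter value at the start of row m (row k contributes n - k cells)
def pvCnt (n : ℕ) : ℕ → Int
  | 0 => 1
  | m + 1 => pvCnt n m + ((n : Int) - (m : Int))

-- the inner-loop step function of A for a fixed row i (definitionally the port's lambda)
def pvStep (i : ℕ) (s : Int × List Int) (j : ℕ) : Int × List Int :=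
  if j < i then (s.1, s.2 ++ [(0 : Int)]) else (s.1 + 1, s.2 ++ [s.1])

lemma pvInner_lt (i : ℕ) (l : List ℕ) (h : ∀ j ∈ l, j < i) (c : Int) (acc : List Int) :
    l.foldl (pvStep i) (c, acc) = (c, acc ++ List.replicate l.length (0 : Int)) := by
  induction l generalizing acc with
  | nil => simp
  | cons a t ih =>
    simp only [List.foldl_cons, pvStep, if_pos (h a (by simp))]
    rw [ih (fun j hj => h j (by simp [hj]))]
    simp [List.replicate_succ]

lemma pvInner_ge (i : ℕ) (l : List ℕ) (h : ∀ j ∈ l, ¬ j < i) (c : Int) (acc : List Int) :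
    l.foldl (pvStep i) (c, acc) =
      (c + l.length, acc ++ (List.range l.length).map (fun (k : ℕ) => c + (k : Int))) := by
  induction l generalizing c acc with
  | nil => simp
  | cons a t ih =>
    simp only [List.foldl_cons, pvStep, if_neg (h a (by simp))]
    rw [ih (fun j hj => h j (by simp [hj])), Prod.mk.injEq]
    refine ⟨by push_cast [List.length_cons]; ring, ?_⟩
    simp only [List.length_cons, List.range_succ_eq_map, List.map_cons, List.map_map,
      List.append_assoc, List.singleton_append, Nat.cast_zero, add_zero]
    congr 2
    apply List.map_congr_left
    intro k _
    simp only [Function.comp_apply]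
    push_cast
    ring

lemma pvInner (n i : ℕ) (hi : i ≤ n) (c : Int) :
    (List.range n).foldl (pvStep i) (c, []) =
      (c + ((n : Int) - (i : Int)),
       List.replicate i (0 : Int) ++ (List.range (n - i)).map (fun (k : ℕ) => c + (k : Int))) := by
  obtain ⟨d, rfl⟩ : ∃ d, n = i + d := ⟨n - i, by omega⟩
  rw [List.range_add, List.foldl_append]
  rw [pvInner_lt i (List.range i) (by intro j hj; simpa using hj) c []]
  rw [pvInner_ge i ((List.range d).map (i + ·))
    (by intro j hj; simp at hj; obtain ⟨k, _, rfl⟩ := hj; omega) c _]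
  simp only [List.length_map, List.length_range, List.nil_append]
  rw [Prod.mk.injEq]
  refine ⟨by push_cast; ring, ?_⟩
  have hd : i + d - i = d := by omega
  rw [hd]

-- state of A's outer fold after the first m rows
lemma pvOuter (n m : ℕ) (hm : m ≤ n) :
    (List.range m).foldl (fun (st : Int × List (List Int)) (i : ℕ) =>
        let inner := (List.range n).foldl (pvStep i) (st.1, ([] : List Int))
        (inner.1, st.2 ++ [inner.2])) (1, []) =
      (pvCnt n m,
       (List.range m).map (fun (i : ℕ) =>
         List.replicate i (0 : Int) ++
           (List.range (n - i)).map (fun (k : ℕ) => pvCnt n i + (k : Int)))) := by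
  induction m with
  | zero => simp [pvCnt]
  | succ m ih =>
    rw [List.range_succ, List.foldl_append, ih (by omega)]
    simp only [List.foldl_cons, List.foldl_nil]
    rw [pvInner n m (by omega) (pvCnt n m)]
    simp [pvCnt]

-- the closed form equals the recursive counter
lemma pvCnt_closed (n : ℕ) (i : ℕ) :
    pvCnt n i = 1 + (i : Int) * (n : Int) - PySem.Int.floordiv ((i : Int) * ((i : Int) - 1)) 2 := by
  have hdiv : ∀ a : Int, PySem.Int.floordiv (2 * a) 2 = a := by
    intro a
    rw [PySem.Int.floordiv_eq_ediv_of_pos (by norm_num)]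
    omega
  induction i with
  | zero =>
    have h0 : PySem.Int.floordiv 0 2 = 0 := by
      have := hdiv 0
      rw [mul_zero] at this
      exact this
    simp only [pvCnt, Nat.cast_zero, zero_mul, zero_sub]
    rw [h0]
    ring
  | succ i ih =>
    obtain ⟨t, ht⟩ : ∃ t : Int, (i : Int) * ((i : Int) - 1) = 2 * t := by
      rcases Int.even_or_odd (i : Int) with ⟨t, h⟩ | ⟨t, h⟩
      · exact ⟨t * ((i : Int) - 1), by rw [h]; ring⟩
      · exact ⟨(i : Int) * t, by rw [h]; ring⟩
    have ht' : ((i : Int) + 1) * ((i : Int) + 1 - 1) = 2 * (t + i) := by nlinarith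
    rw [pvCnt, ih, ht, hdiv t]
    push_cast
    rw [ht', hdiv (t + (i : Int))]
    nlinarith

lemma pattern3_as_step (N : Int) :
    pattern3 N =
      ((List.range N.toNat).foldl (fun (st : Int × List (List Int)) (i : ℕ) =>
        let inner := (List.range N.toNat).foldl (pvStep i) (st.1, ([] : List Int))
        (inner.1, st.2 ++ [inner.2])) (1, [])).2 := rfl

-- ===== VERDICT (by name: the statement is the Claim_ definition above) =====
theorem pattern3_spec : Claim_equal_pattern3 := by
  intro N _
  unfold Spec_pattern3 pattern3_alt
  rw [pattern3_as_step, pvOuter N.toNat N.toNat (le_refl _)]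
  by_cases hN : 0 ≤ N
  · apply List.map_congr_left
    intro i hi
    simp only
    rw [pvCnt_closed, Int.toNat_of_nonneg hN]
  · have h0 : N.toNat = 0 := Int.toNat_of_nonpos (by omega)
    simp [h0]
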